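-- pv_equiv track=rewrite | github.com/mars887/avi-boost-rework | utils/mux.py | strip_param_tokens
-- ===== SOURCE A (Python) =====
-- from typing import Any, Dict, Iterator, List, Optional, Tuple
--
-- def is_param_key(tok: str) -> bool:
--     t = str(tok or "").strip()
--     return t.startswith("--") or t.startswith("-")
--
-- def strip_param_tokens(tokens: List[str], keys: List[str]) -> List[str]:
--     keys_set = {str(key) for key in keys}
--     out: List[str] = []
--     idx = 0
--     while idx < len(tokens):
--         tok = tokens[idx]
--         if tok in keys_set:
--             has_value = (idx + 1 < len(tokens)) and (not is_param_key(tokens[idx + 1]))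
--             idx += 2 if has_value else 1
--             continue
--         out.append(tok)
--         idx += 1
--     return out
-- ===== SOURCE B (Python) =====
-- def is_param_key(tok: str) -> bool:
--     t = str(tok or "").strip()
--     return t.startswith("--") or t.startswith("-")
--
-- def strip_param_tokens(tokens, keys):
--     keys_set = {str(key) for key in keys}
--     out = []
--     pending = False
--     for tok in tokens:
--         if pending:
--             pending = False
--             if not is_param_key(tok):
--                 continue
--         if tok in keys_set:
--             pending = True
--         else:
--             out.append(tok)
--     return out
-- ===== Notes on version B (the rewrite author's own statement) =====
-- stated objective: idiomatic
-- what changed: Replaced the while-loop with explicit index arithmetic (jump by 2 to consume a key's value) by a single forward for-loop carrying a boolean 'pending' state that decides whether the current token is a consumed value.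
import Mathlib
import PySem

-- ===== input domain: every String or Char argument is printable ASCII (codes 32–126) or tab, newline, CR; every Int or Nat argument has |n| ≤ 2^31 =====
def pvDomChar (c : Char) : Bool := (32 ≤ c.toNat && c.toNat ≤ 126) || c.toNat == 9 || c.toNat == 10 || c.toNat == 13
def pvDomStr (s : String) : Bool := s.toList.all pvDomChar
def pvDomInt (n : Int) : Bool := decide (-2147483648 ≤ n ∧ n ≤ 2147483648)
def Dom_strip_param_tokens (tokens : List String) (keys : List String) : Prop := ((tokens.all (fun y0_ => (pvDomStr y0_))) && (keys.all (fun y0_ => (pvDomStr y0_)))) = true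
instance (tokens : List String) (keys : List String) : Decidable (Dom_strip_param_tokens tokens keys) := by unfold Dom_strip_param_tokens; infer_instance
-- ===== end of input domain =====

-- B replaces A's index-jumping while-loop by a single forward fold carrying a boolean
-- 'pending' state (idiomatic decomposition; same O(n) cost).


-- ===== PORT A =====
-- is_param_key: t = str(tok or "").strip(); t.startswith("--") or t.startswith("-")
def is_param_key (tok : String) : Bool :=
  let t := PySem.Str.strip (if tok = "" then "" else tok)
  PySem.Str.startswith t "--" || PySem.Str.startswith t "-"

-- A's while-loop: idx moves forward by 1 or 2, transcribed as recursion on the suffix tokens[idx:].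
def stripLoopA (ks : PySem.Set String) : List String → List String
  | [] => []
  | tok :: rest =>
    if PySem.Set.contains ks tok then
      match rest with
      | next :: rest' =>
        if ¬ is_param_key next then stripLoopA ks rest'        -- has_value: idx += 2
        else stripLoopA ks (next :: rest')                     -- idx += 1
      | [] => []                                               -- idx += 1 past the end
    else
      tok :: stripLoopA ks rest
termination_by ts => ts.length
decreasing_by all_goals (subst_eqs; simp only [List.length_cons]; omega)

def strip_param_tokens (tokens : List String) (keys : List String) : List String :=
  stripLoopA (PySem.Set.ofList keys) tokens

-- ===== PORT B =====
-- B's for-loop body as a fold step over state (pending, out).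
def stepB (ks : PySem.Set String) (st : Bool × List String) (tok : String) : Bool × List String :=
  if st.1 ∧ ¬ is_param_key tok then (false, st.2)        -- pending: consume the value token
  else if PySem.Set.contains ks tok then (true, st.2)    -- key: start pending
  else (false, st.2 ++ [tok])                            -- ordinary token

def strip_param_tokens_alt (tokens : List String) (keys : List String) : List String :=
  let ks := PySem.Set.ofList keys
  (tokens.foldl (stepB ks) (false, [])).2

-- ===== PRECONDITION & SPEC =====
def Spec_strip_param_tokens (tokens : List String) (keys : List String) (out : List String) : Prop := out = strip_param_tokens_alt tokens keys
instance (tokens : List String) (keys : List String) (out : List String) : Decidable (Spec_strip_param_tokens tokens keys out) := by unfold Spec_strip_param_tokens; infer_instance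

-- ===== CLAIM (what is proved, stated in full; the proofs are below) =====
def Claim_equal_strip_param_tokens : Prop := ∀ (tokens : List String) (keys : List String), Dom_strip_param_tokens tokens keys → Spec_strip_param_tokens tokens keys (strip_param_tokens tokens keys)

-- ===== LEMMAS AND PROOFS =====

-- A's behaviour from the 'pending' state: the next token is consumed iff it is not a param key.
def skipA (ks : PySem.Set String) : List String → List String
  | [] => []
  | next :: rest' =>
    if ¬ is_param_key next then stripLoopA ks rest'
    else stripLoopA ks (next :: rest')

theorem stripLoopA_key {ks : PySem.Set String} {tok : String} (h : tok ∈ ks)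
    (rest : List String) : stripLoopA ks (tok :: rest) = skipA ks rest := by
  cases rest with
  | nil => simp [stripLoopA, skipA, h]
  | cons n r => by_cases hp : is_param_key n = true <;> simp [stripLoopA, skipA, h, hp]

theorem stripLoopA_not_key {ks : PySem.Set String} {tok : String} (h : tok ∉ ks)
    (rest : List String) : stripLoopA ks (tok :: rest) = tok :: stripLoopA ks rest := by
  cases rest <;> simp [stripLoopA, h]

theorem foldl_stepB_eq (ks : PySem.Set String) (ts : List String) :
    (∀ out, (ts.foldl (stepB ks) (false, out)).2 = out ++ stripLoopA ks ts) ∧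
    (∀ out, (ts.foldl (stepB ks) (true, out)).2 = out ++ skipA ks ts) := by
  induction ts with
  | nil => simp [stripLoopA, skipA]
  | cons t rest ih =>
    constructor
    · intro out
      by_cases hk : t ∈ ks
      · have hstep : stepB ks (false, out) t = (true, out) := by simp [stepB, hk]
        rw [List.foldl_cons, hstep, ih.2 out, stripLoopA_key hk]
      · have hstep : stepB ks (false, out) t = (false, out ++ [t]) := by simp [stepB, hk]
        rw [List.foldl_cons, hstep, ih.1 (out ++ [t]), stripLoopA_not_key hk]
        simp
    · intro out
      by_cases hp : is_param_key t = true
      · have hsk : skipA ks (t :: rest) = stripLoopA ks (t :: rest) := by simp [skipA, hp]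
        by_cases hk : t ∈ ks
        · have hstep : stepB ks (true, out) t = (true, out) := by simp [stepB, hp, hk]
          rw [List.foldl_cons, hstep, ih.2 out, hsk, stripLoopA_key hk]
        · have hstep : stepB ks (true, out) t = (false, out ++ [t]) := by simp [stepB, hp, hk]
          rw [List.foldl_cons, hstep, ih.1 (out ++ [t]), hsk, stripLoopA_not_key hk]
          simp
      · have hstep : stepB ks (true, out) t = (false, out) := by simp [stepB, hp]
        rw [List.foldl_cons, hstep, ih.1 out]
        simp [skipA, hp]

-- ===== VERDICT (by name: the statement is the Claim_ definition above) =====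
theorem strip_param_tokens_spec : Claim_equal_strip_param_tokens := by
  intro tokens keys _
  unfold Spec_strip_param_tokens strip_param_tokens strip_param_tokens_alt
  exact ((foldl_stepB_eq (PySem.Set.ofList keys) tokens).1 []).symm
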